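-- pv_equiv track=rewrite | github.com/rjamieson100/word-processing-4 | here_or_there.py | here_or_there
-- ===== SOURCE A (Python) =====
-- def here_or_there(word_list, letter, num_1, num_2):
--     num_1_counter = 0
--     num_2_counter = 0
--     invalid_index = True
--
--     if (num_1 >= 0) & (num_2 >= 0):
--         for x in (word_list):
--             if (len(x) >= 5) & (num_1 < len(x)) & (num_2 < len(x)):
--                 invalid_index = False
--                 if x[num_1] == letter:
--                     num_1_counter += 1
--
--                 if x[num_2] == letter:
--                     num_2_counter += 1
--
--     if invalid_index:
--         return -2
--     elif num_1_counter > num_2_counter: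
--         return num_1
--     elif num_1_counter < num_2_counter:
--         return num_2
--     else:
--         return -1
-- ===== SOURCE B (Python) =====
-- def here_or_there(word_list, letter, num_1, num_2):
--     if num_1 >= 0 and num_2 >= 0:
--         valid = [x for x in word_list
--                  if len(x) >= 5 and num_1 < len(x) and num_2 < len(x)]
--     else:
--         valid = []
--     if not valid:
--         return -2
--     c1 = sum(1 for x in valid if x[num_1] == letter)
--     c2 = sum(1 for x in valid if x[num_2] == letter)
--     if c1 > c2:
--         return num_1
--     if c1 < c2:
--         return num_2
--     return -1
-- ===== Notes on version B (the rewrite author's own statement) =====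
-- stated objective: simpler
-- what changed: Replaces the single stateful loop carrying two counters and an invalid flag by filter-then-count: build the list of valid words once, derive the invalid case from its emptiness, and compute the two counters as independent counting passes.
import Mathlib
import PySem

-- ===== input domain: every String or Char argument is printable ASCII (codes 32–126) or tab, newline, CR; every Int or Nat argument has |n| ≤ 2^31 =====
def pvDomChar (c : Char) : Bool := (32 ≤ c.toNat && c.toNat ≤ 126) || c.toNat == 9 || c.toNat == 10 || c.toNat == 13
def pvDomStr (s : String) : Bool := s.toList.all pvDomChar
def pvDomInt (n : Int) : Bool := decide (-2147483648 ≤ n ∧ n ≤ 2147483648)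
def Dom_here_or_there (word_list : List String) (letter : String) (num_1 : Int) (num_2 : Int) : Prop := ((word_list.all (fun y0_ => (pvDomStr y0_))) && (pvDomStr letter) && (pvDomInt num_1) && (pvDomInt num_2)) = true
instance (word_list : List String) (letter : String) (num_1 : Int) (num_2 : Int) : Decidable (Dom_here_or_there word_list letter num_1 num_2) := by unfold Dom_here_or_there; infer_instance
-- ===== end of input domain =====

-- B replaces A's single stateful loop (two counters + invalid flag) by filter-then-count: simpler decomposition, same cost.


-- shared primitive: 'x[i] == letter' (x[i] is a one-character string in Python)
def hotHit (x letter : String) (i : Int) : Bool :=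
  match PySem.Str.pyGet? x i with
  | some c => [c] == letter.toList
  | none => false

-- 'len(x) >= 5 and num_1 < len(x) and num_2 < len(x)'
def hotValid (num_1 num_2 : Int) (x : String) : Bool :=
  decide (PySem.Str.len x ≥ 5 ∧ num_1 < PySem.Str.len x ∧ num_2 < PySem.Str.len x)

-- ===== PORT A =====
def here_or_there (word_list : List String) (letter : String) (num_1 : Int) (num_2 : Int) : Int :=
  let st : Int × Int × Bool :=
    if num_1 ≥ 0 ∧ num_2 ≥ 0 then
      word_list.foldl (fun (s : Int × Int × Bool) x =>
        if hotValid num_1 num_2 x then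
          (s.1 + (if hotHit x letter num_1 then 1 else 0),
           s.2.1 + (if hotHit x letter num_2 then 1 else 0),
           false)
        else s) (0, 0, true)
    else (0, 0, true)
  if st.2.2 then -2
  else if st.1 > st.2.1 then num_1
  else if st.1 < st.2.1 then num_2
  else -1

-- ===== PORT B =====
def here_or_there_alt (word_list : List String) (letter : String) (num_1 : Int) (num_2 : Int) : Int :=
  let valid : List String :=
    if num_1 ≥ 0 ∧ num_2 ≥ 0 then word_list.filter (hotValid num_1 num_2) else []
  if valid = [] then -2
  else
    let c1 : Int := (valid.countP (fun x => hotHit x letter num_1) : Nat)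
    let c2 : Int := (valid.countP (fun x => hotHit x letter num_2) : Nat)
    if c1 > c2 then num_1
    else if c1 < c2 then num_2
    else -1

-- ===== PRECONDITION & SPEC =====
def Spec_here_or_there (word_list : List String) (letter : String) (num_1 : Int) (num_2 : Int) (out : Int) : Prop := out = here_or_there_alt word_list letter num_1 num_2
instance (word_list : List String) (letter : String) (num_1 : Int) (num_2 : Int) (out : Int) : Decidable (Spec_here_or_there word_list letter num_1 num_2 out) := by unfold Spec_here_or_there; infer_instance

-- ===== CLAIM (what is proved, stated in full; the proofs are below) =====
def Claim_equal_here_or_there : Prop := ∀ (word_list : List String) (letter : String) (num_1 : Int) (num_2 : Int), Dom_here_or_there word_list letter num_1 num_2 → Spec_here_or_there word_list letter num_1 num_2 (here_or_there word_list letter num_1 num_2)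

-- ===== LEMMAS AND PROOFS =====

-- A's loop state in terms of B's filtered list
theorem hot_foldl_char (letter : String) (num_1 num_2 : Int) (l : List String) :
    ∀ (a b : Int) (inv : Bool),
    l.foldl (fun (s : Int × Int × Bool) x =>
        if hotValid num_1 num_2 x then
          (s.1 + (if hotHit x letter num_1 then 1 else 0),
           s.2.1 + (if hotHit x letter num_2 then 1 else 0),
           false)
        else s) (a, b, inv)
      = (a + ((l.filter (hotValid num_1 num_2)).countP (fun x => hotHit x letter num_1) : Nat),
         b + ((l.filter (hotValid num_1 num_2)).countP (fun x => hotHit x letter num_2) : Nat),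
         inv && (l.filter (hotValid num_1 num_2)).isEmpty) := by
  induction l with
  | nil => intro a b inv; simp
  | cons x xs ih =>
    intro a b inv
    by_cases hv : hotValid num_1 num_2 x
    · simp only [List.foldl_cons, List.filter_cons, hv, if_pos, ih]
      simp [List.countP_cons]
      constructor
      · by_cases h1 : hotHit x letter num_1 <;> simp [h1] <;> push_cast <;> ring
      · by_cases h2 : hotHit x letter num_2 <;> simp [h2] <;> push_cast <;> ring
    · simp [List.foldl_cons, List.filter_cons, hv, ih]

-- ===== VERDICT (by name: the statement is the Claim_ definition above) =====
theorem here_or_there_spec : Claim_equal_here_or_there := by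
  intro word_list letter num_1 num_2 _
  show here_or_there word_list letter num_1 num_2 = here_or_there_alt word_list letter num_1 num_2
  unfold here_or_there here_or_there_alt
  by_cases hg : num_1 ≥ 0 ∧ num_2 ≥ 0
  · simp only [hg, hot_foldl_char]
    by_cases he : word_list.filter (hotValid num_1 num_2) = []
    · simp [he]
    · simp [he, List.isEmpty_iff]
  · simp [hg]
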